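-- pv_equiv track=rewrite | github.com/ZonatedCord/Morpheus | src/finder_clienti_varesotto/online_research.py | choose_review_profile
-- ===== SOURCE A (Python) =====
-- def choose_review_profile(
--     directory_profile: dict[str, str],
--     tripadvisor_profile: dict[str, str],
--     thefork_profile: dict[str, str],
-- ) -> dict[str, str]:
--     candidates = []
--     if directory_profile.get("rating") or directory_profile.get("review_count"):
--         candidates.append(
--             {
--                 "source": directory_profile.get("source", ""),
--                 "url": directory_profile.get("url", ""),
--                 "rating": directory_profile.get("rating", ""),
--                 "review_count": directory_profile.get("review_count", ""),
--                 "summary": directory_profile.get("review_summary", ""),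
--                 "keywords": directory_profile.get("review_keywords", ""),
--                 "status": directory_profile.get("status", ""),
--             }
--         )
--     for name, profile in [("tripadvisor", tripadvisor_profile), ("thefork", thefork_profile)]:
--         if profile.get("rating") or profile.get("review_count"):
--             candidates.append(
--                 {
--                     "source": name,
--                     "url": profile.get("url", ""),
--                     "rating": profile.get("rating", ""),
--                     "review_count": profile.get("review_count", ""),
--                     "summary": profile.get("snippet", ""),
--                     "keywords": "",
--                     "status": profile.get("status", ""),
--                 }
--             )
--     if not candidates:
--         return {
--             "source": "",
--             "url": "",
--             "rating": "",
--             "review_count": "",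
--             "summary": "",
--             "keywords": "",
--             "status": "NOT_FOUND",
--         }
--     candidates.sort(
--         key=lambda item: (
--             1 if item["rating"] else 0,
--             int(item["review_count"] or "0"),
--         ),
--         reverse=True,
--     )
--     return candidates[0]
-- ===== SOURCE B (Python) =====
-- def choose_review_profile(
--     directory_profile: dict[str, str],
--     tripadvisor_profile: dict[str, str],
--     thefork_profile: dict[str, str],
-- ) -> dict[str, str]:
--     best = None
--     best_key = None
--     for name, profile in (
--         ("", directory_profile),
--         ("tripadvisor", tripadvisor_profile),
--         ("thefork", thefork_profile),
--     ):
--         rating = profile.get("rating") or ""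
--         count = profile.get("review_count") or ""
--         if not rating and not count:
--             continue
--         key = (1 if rating else 0, int(count or "0"))
--         if best is None or key > best_key:
--             if not name:
--                 best = {
--                     "source": profile.get("source", ""),
--                     "url": profile.get("url", ""),
--                     "rating": rating,
--                     "review_count": count,
--                     "summary": profile.get("review_summary", ""),
--                     "keywords": profile.get("review_keywords", ""),
--                     "status": profile.get("status", ""),
--                 }
--             else:
--                 best = {
--                     "source": name,
--                     "url": profile.get("url", ""),
--                     "rating": rating,
--                     "review_count": count,
--                     "summary": profile.get("snippet", ""),
--                     "keywords": "",
--                     "status": profile.get("status", ""),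
--                 }
--             best_key = key
--     if best is None:
--         return {
--             "source": "",
--             "url": "",
--             "rating": "",
--             "review_count": "",
--             "summary": "",
--             "keywords": "",
--             "status": "NOT_FOUND",
--         }
--     return best
-- ===== Notes on version B (the rewrite author's own statement) =====
-- stated objective: simpler
-- what changed: A collects candidate dicts into a list, reverse-sorts it by a (rating-present, review-count) key and returns the first element; B makes a single pass over the three sources keeping a running best candidate and its key, replacing only on a strictly greater key so ties keep the earliest source, and builds a candidate dict only when it becomes the best.
import Mathlib
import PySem

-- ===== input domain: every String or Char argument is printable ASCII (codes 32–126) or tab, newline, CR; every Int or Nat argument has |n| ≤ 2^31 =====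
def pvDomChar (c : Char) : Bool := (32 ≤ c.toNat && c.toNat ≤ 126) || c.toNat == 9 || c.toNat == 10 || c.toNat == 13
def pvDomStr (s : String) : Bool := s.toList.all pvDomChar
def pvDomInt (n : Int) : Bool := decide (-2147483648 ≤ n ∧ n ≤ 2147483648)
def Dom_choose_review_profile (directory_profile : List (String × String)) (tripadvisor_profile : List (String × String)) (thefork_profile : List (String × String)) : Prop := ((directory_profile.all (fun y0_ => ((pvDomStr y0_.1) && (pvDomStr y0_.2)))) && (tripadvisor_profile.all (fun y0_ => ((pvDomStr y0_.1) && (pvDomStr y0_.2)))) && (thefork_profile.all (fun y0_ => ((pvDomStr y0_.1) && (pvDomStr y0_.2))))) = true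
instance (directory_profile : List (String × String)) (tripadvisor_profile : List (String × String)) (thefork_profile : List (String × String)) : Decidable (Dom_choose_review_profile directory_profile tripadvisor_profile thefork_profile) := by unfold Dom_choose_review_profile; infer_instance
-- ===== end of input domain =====

-- B replaces A's build-then-reverse-sort-then-take-first by a single pass that keeps a
-- running best candidate (strictly-greater key replaces, so ties keep the earliest);
-- objective: simpler.

-- ===== PORT A =====
-- profile.get(k, d)
def pvG (p : List (String × String)) (k d : String) : String := (PySem.Dict.mk p).getD k d

-- 'profile.get("rating") or profile.get("review_count")' truthiness
def pvTruthy (p : List (String × String)) : Bool :=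
  pvG p "rating" "" ≠ "" || pvG p "review_count" "" ≠ ""

def pvDirCand (p : List (String × String)) : List (String × String) :=
  [("source", pvG p "source" ""), ("url", pvG p "url" ""), ("rating", pvG p "rating" ""),
   ("review_count", pvG p "review_count" ""), ("summary", pvG p "review_summary" ""),
   ("keywords", pvG p "review_keywords" ""), ("status", pvG p "status" "")]

def pvOtherCand (name : String) (p : List (String × String)) : List (String × String) :=
  [("source", name), ("url", pvG p "url" ""), ("rating", pvG p "rating" ""),
   ("review_count", pvG p "review_count" ""), ("summary", pvG p "snippet" ""),
   ("keywords", ""), ("status", pvG p "status" "")]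

def pvNotFound : List (String × String) :=
  [("source", ""), ("url", ""), ("rating", ""), ("review_count", ""),
   ("summary", ""), ("keywords", ""), ("status", "NOT_FOUND")]

-- sort key component 1: 1 if item["rating"] else 0
def pvKey1 (c : List (String × String)) : Int := if pvG c "rating" "" ≠ "" then 1 else 0
-- sort key component 2: int(item["review_count"] or "0"); total under Pre_ (ValueError excluded)
def pvKey2 (c : List (String × String)) : Int :=
  (PySem.Int.ofStr? (if pvG c "review_count" "" ≠ "" then pvG c "review_count" "" else "0")).getD 0

def choose_review_profile (directory_profile : List (String × String)) (tripadvisor_profile : List (String × String)) (thefork_profile : List (String × String)) : List (String × String) :=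
  let candidates : List (List (String × String)) :=
    if pvTruthy directory_profile then [pvDirCand directory_profile] else []
  let candidates :=
    [("tripadvisor", tripadvisor_profile), ("thefork", thefork_profile)].foldl
      (fun acc np => if pvTruthy np.2 then acc ++ [pvOtherCand np.1 np.2] else acc) candidates
  if candidates = [] then pvNotFound
  else (PySem.List.sorted2 candidates pvKey1 pvKey2 true).headD pvNotFound

-- ===== PORT B =====
-- one step of B's loop: state = Option (best candidate, its key)
def pvAltStep (st : Option (List (String × String) × Int × Int))
    (np : String × List (String × String)) : Option (List (String × String) × Int × Int) :=
  let rating := pvG np.2 "rating" ""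
  let count := pvG np.2 "review_count" ""
  if rating = "" ∧ count = "" then st
  else
    let key : Int × Int :=
      (if rating ≠ "" then 1 else 0,
       (PySem.Int.ofStr? (if count ≠ "" then count else "0")).getD 0)
    let take : Bool :=
      match st with
      | none => true
      | some (_, bk) => bk.1 < key.1 || (bk.1 = key.1 && bk.2 < key.2)   -- key > best_key (lex)
    if take then
      some ((if np.1 = "" then pvDirCand np.2 else pvOtherCand np.1 np.2), key)
    else st

def choose_review_profile_alt (directory_profile : List (String × String)) (tripadvisor_profile : List (String × String)) (thefork_profile : List (String × String)) : List (String × String) :=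
  match [("", directory_profile), ("tripadvisor", tripadvisor_profile), ("thefork", thefork_profile)].foldl pvAltStep none with
  | none => pvNotFound
  | some (best, _) => best

-- ===== PRECONDITION & SPEC =====
-- Pre_ excludes exactly the inputs where Python A raises ValueError: a profile whose
-- truthy review_count string is not an int() literal (both programs raise there).
def Pre_choose_review_profile (directory_profile : List (String × String)) (tripadvisor_profile : List (String × String)) (thefork_profile : List (String × String)) : Prop :=
  (pvG directory_profile "review_count" "" = "" ∨ (PySem.Int.ofStr? (pvG directory_profile "review_count" "")).isSome) ∧
  (pvG tripadvisor_profile "review_count" "" = "" ∨ (PySem.Int.ofStr? (pvG tripadvisor_profile "review_count" "")).isSome) ∧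
  (pvG thefork_profile "review_count" "" = "" ∨ (PySem.Int.ofStr? (pvG thefork_profile "review_count" "")).isSome)
instance (directory_profile : List (String × String)) (tripadvisor_profile : List (String × String)) (thefork_profile : List (String × String)) : Decidable (Pre_choose_review_profile directory_profile tripadvisor_profile thefork_profile) := by unfold Pre_choose_review_profile; infer_instance

def pvWitness_choose_review_profile : (List (String × String)) × (List (String × String)) × (List (String × String)) :=
  ([("rating", "4.5"), ("review_count", "12"), ("source", "dir")], [("rating", "4"), ("review_count", "12")], [])

def Spec_choose_review_profile (directory_profile : List (String × String)) (tripadvisor_profile : List (String × String)) (thefork_profile : List (String × String)) (out : List (String × String)) : Prop := out = choose_review_profile_alt directory_profile tripadvisor_profile thefork_profile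
instance (directory_profile : List (String × String)) (tripadvisor_profile : List (String × String)) (thefork_profile : List (String × String)) (out : List (String × String)) : Decidable (Spec_choose_review_profile directory_profile tripadvisor_profile thefork_profile out) := by unfold Spec_choose_review_profile; infer_instance

-- ===== CLAIM (what is proved, stated in full; the proofs are below) =====
def Claim_equal_choose_review_profile : Prop := ∀ (directory_profile : List (String × String)) (tripadvisor_profile : List (String × String)) (thefork_profile : List (String × String)), Dom_choose_review_profile directory_profile tripadvisor_profile thefork_profile → Pre_choose_review_profile directory_profile tripadvisor_profile thefork_profile → Spec_choose_review_profile directory_profile tripadvisor_profile thefork_profile (choose_review_profile directory_profile tripadvisor_profile thefork_profile)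

-- ===== LEMMAS AND PROOFS =====
-- B's skip test is the negation of A's truthiness test
lemma pvSkip_iff (p : List (String × String)) :
    (pvG p "rating" "" = "" ∧ pvG p "review_count" "" = "") ↔ ¬ (pvTruthy p = true) := by
  simp [pvTruthy]

-- head of A's reverse-sorted candidate list, for each possible candidate count
lemma pvHead1 (c1 : List (String × String)) :
    (PySem.List.sorted2 [c1] pvKey1 pvKey2 true).headD pvNotFound = c1 := rfl

lemma pvHead2 (c1 c2 : List (String × String)) :
    (PySem.List.sorted2 [c1, c2] pvKey1 pvKey2 true).headD pvNotFound =
      if pvKey1 c1 < pvKey1 c2 ∨ (pvKey1 c1 = pvKey1 c2 ∧ pvKey2 c1 < pvKey2 c2) then c2 else c1 := by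
  simp only [PySem.List.sorted2, List.foldl, PySem.List.insertBy]
  split_ifs <;> simp_all <;> omega

lemma pvHead3 (c1 c2 c3 : List (String × String)) :
    (PySem.List.sorted2 [c1, c2, c3] pvKey1 pvKey2 true).headD pvNotFound =
      if pvKey1 c1 < pvKey1 c2 ∨ (pvKey1 c1 = pvKey1 c2 ∧ pvKey2 c1 < pvKey2 c2) then
        (if pvKey1 c2 < pvKey1 c3 ∨ (pvKey1 c2 = pvKey1 c3 ∧ pvKey2 c2 < pvKey2 c3) then c3 else c2)
      else
        (if pvKey1 c1 < pvKey1 c3 ∨ (pvKey1 c1 = pvKey1 c3 ∧ pvKey2 c1 < pvKey2 c3) then c3 else c1) := by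
  simp only [PySem.List.sorted2, List.foldl, PySem.List.insertBy]
  split_ifs <;> simp_all [PySem.List.insertBy] <;> split_ifs at * <;> simp_all <;> omega

-- both programs' sort keys, as a function of the source profile (all definitional)
def pvK1 (p : List (String × String)) : Int := if pvG p "rating" "" ≠ "" then 1 else 0
def pvK2 (p : List (String × String)) : Int :=
  (PySem.Int.ofStr? (if pvG p "review_count" "" ≠ "" then pvG p "review_count" "" else "0")).getD 0
lemma pvKey1_dir (p : List (String × String)) : pvKey1 (pvDirCand p) = pvK1 p := rfl
lemma pvKey2_dir (p : List (String × String)) : pvKey2 (pvDirCand p) = pvK2 p := rfl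
lemma pvKey1_other (n : String) (p : List (String × String)) : pvKey1 (pvOtherCand n p) = pvK1 p := rfl
lemma pvKey2_other (n : String) (p : List (String × String)) : pvKey2 (pvOtherCand n p) = pvK2 p := rfl
lemma pvK1_if (p : List (String × String)) : (if pvG p "rating" "" ≠ "" then (1 : Int) else 0) = pvK1 p := rfl
lemma pvK2_if (p : List (String × String)) :
    (PySem.Int.ofStr? (if pvG p "review_count" "" ≠ "" then pvG p "review_count" "" else "0")).getD 0 = pvK2 p := rfl

-- ===== VERDICT (by name: the statement is the Claim_ definition above) =====
set_option maxHeartbeats 2000000 in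
theorem choose_review_profile_spec : Claim_equal_choose_review_profile := by
  intro d t f hdom hpre
  clear hdom hpre
  by_cases h1 : pvTruthy d = true <;>
  by_cases h2 : pvTruthy t = true <;>
  by_cases h3 : pvTruthy f = true <;>
    simp only [Spec_choose_review_profile, choose_review_profile, choose_review_profile_alt,
      List.foldl, pvAltStep, pvSkip_iff, h1, h2, h3, not_true, ite_true, ite_false]
  all_goals simp only [Bool.false_eq_true, not_false_eq_true, ite_true,
    List.cons_append, List.nil_append, List.cons_ne_self, reduceCtorEq, if_neg]
  all_goals clear h1 h2 h3
  all_goals simp only [pvHead1, pvHead2, pvHead3, pvKey1_dir, pvKey2_dir, pvKey1_other,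
    pvKey2_other, pvK1_if, pvK2_if, String.reduceEq, if_false, Bool.or_eq_true,
    Bool.and_eq_true, decide_eq_true_eq]
  all_goals split_ifs <;>
    first
      | rfl
      | omega
      | ((try simp only [Bool.or_eq_true, Bool.and_eq_true, decide_eq_true_eq, not_or] at *) <;> (try split_ifs at *) <;> first | rfl | omega)
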